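-- pv_equiv track=rewrite | github.com/mtskillman/advent_of_code_2015 | day_11.py | third_requirement
-- ===== SOURCE A (Python) =====
-- def third_requirement(string):
--     #return bool
--     count = 0
--     last_char = ""
--     for char in string:
--         if char == last_char:
--             count += 1
--             last_char = ""
--             continue
--         last_char = char
--     if count >= 2:
--         return True
--     return False
-- ===== SOURCE B (Python) =====
-- def third_requirement(string):
--     # stage 1: run-length encode the string into maximal runs of equal characters
--     runs = []
--     for ch in string:
--         if runs and runs[-1][0] == ch:
--             runs[-1] = (ch, runs[-1][1] + 1)
--         else:
--             runs.append((ch, 1))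
--     # stage 2: a maximal run of length k contains exactly k // 2 non-overlapping pairs
--     return sum(k // 2 for _, k in runs) >= 2
-- ===== Notes on version B (the rewrite author's own statement) =====
-- stated objective: alternative
-- what changed: Replaced A's one-pass last_char state machine with a two-stage algorithm: run-length encode the string into maximal runs, then count pairs arithmetically as the sum of k//2 over run lengths.
import Mathlib
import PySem

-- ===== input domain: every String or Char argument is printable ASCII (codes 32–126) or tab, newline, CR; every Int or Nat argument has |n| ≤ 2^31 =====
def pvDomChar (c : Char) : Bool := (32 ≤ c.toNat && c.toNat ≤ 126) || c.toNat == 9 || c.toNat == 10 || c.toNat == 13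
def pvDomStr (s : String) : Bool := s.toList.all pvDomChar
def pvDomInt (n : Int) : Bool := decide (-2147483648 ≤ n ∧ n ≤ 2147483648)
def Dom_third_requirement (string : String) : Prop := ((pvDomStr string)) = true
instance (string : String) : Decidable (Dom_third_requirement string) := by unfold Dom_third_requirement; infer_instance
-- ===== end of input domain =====

-- B replaces A's one-pass last_char state machine with a two-stage algorithm: run-length
-- encode the string into maximal runs, then count pairs as the sum of k // 2 over run lengths
-- (alternative decomposition; return values agree on all inputs).

-- ===== PORT A =====
-- state = (count, last_char); last_char = "" is modelled as `none` (a char never equals "")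
def pvStepA (st : Int × Option Char) (char : Char) : Int × Option Char :=
  match st.2 with
  | some lc => if char = lc then (st.1 + 1, none) else (st.1, some char)
  | none => (st.1, some char)

def third_requirement (string : String) : Bool :=
  let st := string.toList.foldl pvStepA (0, none)
  if st.1 ≥ 2 then true else false

-- ===== PORT B =====
-- stage 1 of Source B: the runs list, builtby the loop. Python appends at the end and
-- mutates runs[-1]; the fold keeps the list REVERSED (head = current last run) so that the
-- last-element update is the head update — the runs are `.reverse` of the accumulator,
-- taken below before stage 2, so the ported value is exactly Source B's runs list.
def pvRleStep (runs : List (Char × Int)) (ch : Char) : List (Char × Int) :=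
  match runs with
  | (c, k) :: rest => if c = ch then (ch, k + 1) :: rest else (ch, 1) :: (c, k) :: rest
  | [] => [(ch, 1)]

def third_requirement_alt (string : String) : Bool :=
  let runs := (string.toList.foldl pvRleStep []).reverse
  -- stage 2 of Source B: sum(k // 2 for _, k in runs) >= 2
  decide ((runs.map (fun p => PySem.Int.floordiv p.2 2)).sum ≥ 2)

-- ===== PRECONDITION & SPEC =====
def Spec_third_requirement (string : String) (out : Bool) : Prop := out = third_requirement_alt string
instance (string : String) (out : Bool) : Decidable (Spec_third_requirement string out) := by unfold Spec_third_requirement; infer_instance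

-- ===== CLAIM (what is proved, stated in full; the proofs are below) =====
def Claim_equal_third_requirement : Prop := ∀ (string : String), Dom_third_requirement string → Spec_third_requirement string (third_requirement string)

-- ===== LEMMAS AND PROOFS =====

-- common yardstick: the number of non-overlapping adjacent equal pairs, greedy left-to-right
def pvCountPairs : List Char → Int
  | a :: b :: rest => if a = b then 1 + pvCountPairs rest else pvCountPairs (b :: rest)
  | _ => 0

-- A's fold computes pvCountPairs
theorem pvFoldA_eq : ∀ (l : List Char) (c : Int),
    (l.foldl pvStepA (c, none)).1 = c + pvCountPairs l
  | [], c => by simp [pvCountPairs]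
  | [a], c => by simp [pvStepA, pvCountPairs]
  | a :: b :: rest, c => by
    by_cases h : b = a
    · subst h
      have := pvFoldA_eq rest (c + 1)
      simp [List.foldl, pvStepA, pvCountPairs, this]
      ring
    · have := pvFoldA_eq (b :: rest) c
      simp [List.foldl, pvStepA] at this ⊢
      rw [pvCountPairs, if_neg (fun h' : a = b => h h'.symm)]
      rw [if_neg h]; exact this
termination_by l => l.length

-- the RLE step only ever touches the head of the accumulator
theorem pvRleFold_cons : ∀ (l : List Char) (a : Char × Int) (rest : List (Char × Int)),
    List.foldl pvRleStep (a :: rest) l = List.foldl pvRleStep [a] l ++ rest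
  | [], a, rest => by simp
  | ch :: t, (c, k), rest => by
    by_cases h : c = ch
    · simp only [List.foldl, pvRleStep, if_pos h]
      exact pvRleFold_cons t (ch, k + 1) rest
    · simp only [List.foldl, pvRleStep, if_neg h]
      rw [pvRleFold_cons t (ch, 1) ((c, k) :: rest), pvRleFold_cons t (ch, 1) [(c, k)]]
      simp

def pvHalfSum (runs : List (Char × Int)) : Int :=
  (runs.map (fun p => PySem.Int.floordiv p.2 2)).sum

-- stage-2 sum over the RLE of (c repeated k)·l equals k//2 plus the greedy pair count,
-- where an odd run leaves one c pending in front of l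
theorem pvRleSum_eq : ∀ (l : List Char) (c : Char) (k : Int), 1 ≤ k →
    pvHalfSum (List.foldl pvRleStep [(c, k)] l)
      = PySem.Int.floordiv k 2
        + (if PySem.Int.mod k 2 = 1 then pvCountPairs (c :: l) else pvCountPairs l)
  | [], c, k, hk => by
    have h1 : pvCountPairs [c] = 0 := rfl
    have h2 : pvCountPairs [] = 0 := rfl
    simp only [List.foldl, pvHalfSum, List.map, List.sum_cons, List.sum_nil, h1, h2]
    split <;> simp
  | ch :: t, c, k, hk => by
    rw [PySem.Int.mod_eq_emod_of_pos (by norm_num : (0:Int) < 2) (a := k)]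
    by_cases h : c = ch
    · subst h
      simp only [List.foldl, pvRleStep, if_true]
      have ih := pvRleSum_eq t c (k + 1) (by omega)
      rw [PySem.Int.mod_eq_emod_of_pos (by norm_num : (0:Int) < 2) (a := k+1)] at ih
      rw [PySem.Int.floordiv_eq_ediv_of_pos (by norm_num : (0:Int) < 2) (a := k+1)] at ih
      rw [ih, PySem.Int.floordiv_eq_ediv_of_pos (by norm_num : (0:Int) < 2) (a := k)]
      have hpp : pvCountPairs (c :: c :: t) = 1 + pvCountPairs t := by
        rw [pvCountPairs, if_pos rfl]
      rw [hpp]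
      by_cases hp : k % 2 = 1
      · rw [if_pos hp, if_neg (by omega : ¬ (k + 1) % 2 = 1)]
        have h2 : (k + 1) / 2 = k / 2 + 1 := by omega
        rw [h2]; ring
      · rw [if_neg hp, if_pos (by omega : (k + 1) % 2 = 1)]
        have h2 : (k + 1) / 2 = k / 2 := by omega
        rw [h2]
    · simp only [List.foldl, pvRleStep, if_neg h]
      rw [pvRleFold_cons t (ch, 1) [(c, k)]]
      have ih := pvRleSum_eq t ch 1 le_rfl
      rw [if_pos (by decide : PySem.Int.mod 1 2 = 1),
        (by decide : PySem.Int.floordiv 1 2 = 0)] at ih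
      rw [zero_add] at ih
      have hsum : pvHalfSum (List.foldl pvRleStep [(ch, 1)] t ++ [(c, k)])
          = pvHalfSum (List.foldl pvRleStep [(ch, 1)] t) + PySem.Int.floordiv k 2 := by
        simp [pvHalfSum]
      have hcp : pvCountPairs (c :: ch :: t) = pvCountPairs (ch :: t) := by
        rw [pvCountPairs, if_neg h]
      rw [hsum, ih]
      split <;> [rw [hcp]; skip] <;> ring
termination_by l => l.length

-- ===== VERDICT (by name: the statement is the Claim_ definition above) =====
theorem third_requirement_spec : Claim_equal_third_requirement := by
  intro s _
  unfold Spec_third_requirement third_requirement third_requirement_alt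
  have hA := pvFoldA_eq s.toList 0
  simp only [zero_add] at hA
  have hB : ((List.foldl pvRleStep [] s.toList).reverse.map
      (fun p => PySem.Int.floordiv p.2 2)).sum = pvCountPairs s.toList := by
    cases hl : s.toList with
    | nil => simp [pvCountPairs]
    | cons c t =>
      have hstep : List.foldl pvRleStep [] (c :: t) = List.foldl pvRleStep [(c, 1)] t := by
        simp [List.foldl, pvRleStep]
      rw [hstep]
      have hr : ((List.foldl pvRleStep [(c, 1)] t).reverse.map
          (fun p => PySem.Int.floordiv p.2 2)).sum
          = pvHalfSum (List.foldl pvRleStep [(c, 1)] t) := by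
        simp [pvHalfSum]
      rw [hr, pvRleSum_eq t c 1 le_rfl,
        if_pos (by decide : PySem.Int.mod 1 2 = 1),
        (by decide : PySem.Int.floordiv 1 2 = 0)]
      exact zero_add _
  simp only [ge_iff_le, hA, hB]
  by_cases hc : 2 ≤ pvCountPairs s.toList <;> simp [hc]
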